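-- pv_equiv track=rewrite | github.com/Trump0412/HyperGaussian | gaussian_stellar/semantics/grounded_sam2_backend.py | _stable_split_frames
-- ===== SOURCE A (Python) =====
-- from typing import Any
--
-- def _stable_split_frames(frame_rows: list[dict[str, Any]], min_components: int = 2, min_stable: int = 2) -> list[int]:
--     active_rows = [
--         row
--         for row in sorted(frame_rows, key=lambda item: int(item["frame_index"]))
--         if int(row.get("component_count", 0)) >= int(min_components)
--     ]
--     if not active_rows:
--         return []
--     stable: list[int] = []
--     run: list[int] = []
--     prev = None
--     for row in active_rows:
--         frame_index = int(row["frame_index"])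
--         if prev is None or frame_index == prev + 1:
--             run.append(frame_index)
--         else:
--             if len(run) >= int(min_stable):
--                 stable.append(run[0])
--             run = [frame_index]
--         prev = frame_index
--     if len(run) >= int(min_stable):
--         stable.append(run[0])
--     return stable
-- ===== SOURCE B (Python) =====
-- def _stable_split_frames(frame_rows, min_components=2, min_stable=2):
--     mc, ms = int(min_components), int(min_stable)
--     xs = sorted(
--         int(row["frame_index"])
--         for row in frame_rows
--         if int(row.get("component_count", 0)) >= mc
--     )
--     n = len(xs)
--     # A position i starts a stable run iff it is a run start (no consecutive
--     # predecessor occurrence) and the next ms entries form an anchored chain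
--     # xs[i+j] == xs[i] + j; no run list or prev-state is ever materialized.
--     return [
--         xs[i]
--         for i in range(n)
--         if (i == 0 or xs[i] != xs[i - 1] + 1)
--         and (ms <= 1 or (i + ms <= n and all(xs[i + j] == xs[i] + j for j in range(1, ms))))
--     ]
-- ===== Notes on version B (the rewrite author's own statement) =====
-- stated objective: alternative
-- what changed: Instead of A's stateful prev/run accumulator loop over sorted rows, B extracts the sorted filtered indices once and then decides each position independently by a closed positional predicate (run start: xs[i] != xs[i-1]+1; stability: the anchored chain xs[i+j] == xs[i]+j for j < min_stable), never materializing runs; this trades A's O(n) scan for an O(n*min_stable) per-position test.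
import Mathlib
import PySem

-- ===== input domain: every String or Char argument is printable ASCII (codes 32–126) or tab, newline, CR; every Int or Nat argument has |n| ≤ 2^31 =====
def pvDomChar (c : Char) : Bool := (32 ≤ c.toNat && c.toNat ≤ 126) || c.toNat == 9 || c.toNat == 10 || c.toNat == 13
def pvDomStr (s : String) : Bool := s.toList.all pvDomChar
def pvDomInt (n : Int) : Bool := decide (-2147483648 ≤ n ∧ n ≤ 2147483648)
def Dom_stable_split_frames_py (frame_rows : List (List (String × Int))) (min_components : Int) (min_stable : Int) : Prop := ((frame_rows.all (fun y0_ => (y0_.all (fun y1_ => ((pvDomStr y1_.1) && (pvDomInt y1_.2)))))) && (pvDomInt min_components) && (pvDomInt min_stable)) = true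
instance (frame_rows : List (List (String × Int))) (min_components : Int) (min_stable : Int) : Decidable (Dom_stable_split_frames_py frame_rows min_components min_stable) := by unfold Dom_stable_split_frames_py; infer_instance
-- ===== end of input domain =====

-- B replaces A's stateful prev/run accumulator loop by a per-position closed
-- predicate over the sorted filtered index list (run start + anchored chain test),
-- never materializing runs. Equivalence is about the RETURN value; neither
-- program mutates its arguments.

-- ===== PORT A =====
-- row["frame_index"] / row.get("component_count", 0): assoc-list lookup, first match.
-- Under Pre_ every row has "frame_index", so the .getD 0 default is never reached.
def pvLookup (row : List (String × Int)) (k : String) : Option Int :=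
  (row.find? (fun p => p.1 == k)).map (·.2)

def pvFI (row : List (String × Int)) : Int := (pvLookup row "frame_index").getD 0
def pvCC (row : List (String × Int)) : Int := (pvLookup row "component_count").getD 0

def stable_split_frames_py (frame_rows : List (List (String × Int))) (min_components : Int) (min_stable : Int) : List Int :=
  let active := (PySem.List.sorted frame_rows (fun row => pvFI row)).filter
      (fun row => decide (min_components ≤ pvCC row))
  if active = [] then []
  else
    -- for row in active_rows: state = (stable, run, prev)
    let s := active.foldl (fun (st : List Int × List Int × Option Int) row =>
        let f := pvFI row
        match st.2.2 with
        | none => (st.1, st.2.1 ++ [f], some f)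
        | some p =>
          if f = p + 1 then (st.1, st.2.1 ++ [f], some f)
          else ((if min_stable ≤ (st.2.1.length : Int) then st.1 ++ [st.2.1.headD 0] else st.1),
                [f], some f))
      ([], [], none)
    if min_stable ≤ (s.2.1.length : Int) then s.1 ++ [s.2.1.headD 0] else s.1

-- ===== PORT B =====
-- the two halves of Source B's comprehension condition, named for the proofs
-- (i == 0 or xs[i] != xs[i-1]+1)
def pvStartB (xs : List Int) (i : Nat) : Bool :=
  i == 0 || xs.getD i 0 != xs.getD (i - 1) 0 + 1
-- (ms <= 1 or (i + ms <= n and all(xs[i+j] == xs[i] + j for j in range(1, ms))))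
def pvChainB (ms : Int) (xs : List Int) (i : Nat) : Bool :=
  decide (ms ≤ 1) ||
    (decide ((i : Int) + ms ≤ (xs.length : Int)) &&
      (PySem.List.pyRange 1 ms 1).all (fun j => xs.getD (i + j.toNat) 0 == xs.getD i 0 + j))

-- the list comprehension: keep positions passing both tests, read off their values
def pvBcore (ms : Int) (xs : List Int) : List Int :=
  ((List.range xs.length).filter (fun i => pvStartB xs i && pvChainB ms xs i)).map
    (fun i => xs.getD i 0)

def stable_split_frames_py_alt (frame_rows : List (List (String × Int))) (min_components : Int) (min_stable : Int) : List Int :=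
  let xs := PySem.List.sorted
      ((frame_rows.filter (fun row => decide (min_components ≤ pvCC row))).map pvFI)
      (fun x => x)
  pvBcore min_stable xs

-- ===== PRECONDITION & SPEC =====
-- Pre_ excludes exactly the inputs where Python A raises KeyError: some row without
-- a "frame_index" key (A's sort key reads it on every row).
def Pre_stable_split_frames_py (frame_rows : List (List (String × Int))) (min_components : Int) (min_stable : Int) : Prop :=
  ∀ row ∈ frame_rows, (pvLookup row "frame_index").isSome = true
instance (frame_rows : List (List (String × Int))) (min_components : Int) (min_stable : Int) : Decidable (Pre_stable_split_frames_py frame_rows min_components min_stable) := by unfold Pre_stable_split_frames_py; infer_instance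

def pvWitness_stable_split_frames_py : (List (List (String × Int))) × Int × Int :=
  ([[("frame_index", 1), ("component_count", 3)], [("frame_index", 2), ("component_count", 3)], [("frame_index", 4), ("component_count", 0)]], 2, 2)

def Spec_stable_split_frames_py (frame_rows : List (List (String × Int))) (min_components : Int) (min_stable : Int) (out : List Int) : Prop := out = stable_split_frames_py_alt frame_rows min_components min_stable
instance (frame_rows : List (List (String × Int))) (min_components : Int) (min_stable : Int) (out : List Int) : Decidable (Spec_stable_split_frames_py frame_rows min_components min_stable out) := by unfold Spec_stable_split_frames_py; infer_instance

-- ===== CLAIM (what is proved, stated in full; the proofs are below) =====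
def Claim_equal_stable_split_frames_py : Prop := ∀ (frame_rows : List (List (String × Int))) (min_components : Int) (min_stable : Int), Dom_stable_split_frames_py frame_rows min_components min_stable → Pre_stable_split_frames_py frame_rows min_components min_stable → Spec_stable_split_frames_py frame_rows min_components min_stable (stable_split_frames_py frame_rows min_components min_stable)

-- ===== LEMMAS AND PROOFS =====

-- maximal runs of consecutive integers (the common semantic reference)
def pvGrpAdj : List Int → List (List Int)
  | [] => []
  | [x] => [[x]]
  | x :: y :: xs =>
    match pvGrpAdj (y :: xs) with
    | [] => [[x]]
    | g :: gs => if y = x + 1 then (x :: g) :: gs else [x] :: g :: gs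

theorem pvGrpAdj_cons_ne_nil (a : Int) (l : List Int) : pvGrpAdj (a :: l) ≠ [] := by
  cases l with
  | nil => simp [pvGrpAdj]
  | cons b t =>
    unfold pvGrpAdj
    cases pvGrpAdj (b :: t) with
    | nil => simp
    | cons g gs => dsimp only; split <;> simp

theorem pvGrpAdj_head (a : Int) (l : List Int) :
    ∃ t gs, pvGrpAdj (a :: l) = (a :: t) :: gs := by
  cases l with
  | nil => exact ⟨[], [], rfl⟩
  | cons b t =>
    unfold pvGrpAdj
    cases pvGrpAdj (b :: t) with
    | nil => exact ⟨[], [], rfl⟩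
    | cons g gs =>
      dsimp only; split
      · exact ⟨g, gs, rfl⟩
      · exact ⟨[], g :: gs, rfl⟩

-- first-run decomposition of a nonempty list
theorem pvGrpAdj_decomp (x : Int) (l : List Int) :
    ∃ g rest, x :: l = g ++ rest ∧ pvGrpAdj (x :: l) = g :: pvGrpAdj rest ∧ g ≠ [] ∧
      (∀ k, k < g.length → g.getD k 0 = x + k) ∧
      (rest = [] ∨ rest.getD 0 0 ≠ x + g.length) := by
  induction l generalizing x with
  | nil =>
    refine ⟨[x], [], by simp, by simp [pvGrpAdj], by simp, ?_, Or.inl rfl⟩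
    intro k hk
    simp only [List.length_cons, List.length_nil] at hk
    have : k = 0 := by omega
    subst this; simp
  | cons y t ih =>
    by_cases hc : y = x + 1
    · obtain ⟨g', rest', heq, hgrp, hne, hcons, hbrk⟩ := ih y
      refine ⟨x :: g', rest', by simp [← heq], ?_, by simp, ?_, ?_⟩
      · rw [show pvGrpAdj (x :: y :: t) = (match pvGrpAdj (y :: t) with
              | [] => [[x]]
              | g :: gs => if y = x + 1 then (x :: g) :: gs else [x] :: g :: gs) from rfl, hgrp]
        simp [hc]
      · intro k hk
        cases k with
        | zero => simp
        | succ k' =>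
          have := hcons k' (by simpa using hk)
          simp only [List.getD_cons_succ, this]
          push_cast; omega
      · cases hbrk with
        | inl h => exact Or.inl h
        | inr h =>
          refine Or.inr ?_
          simp only [List.length_cons]
          intro hcontra
          apply h
          rw [hcontra, hc]
          push_cast; ring
    · refine ⟨[x], y :: t, by simp, ?_, by simp, ?_, ?_⟩
      · rw [show pvGrpAdj (x :: y :: t) = (match pvGrpAdj (y :: t) with
              | [] => [[x]]
              | g :: gs => if y = x + 1 then (x :: g) :: gs else [x] :: g :: gs) from rfl]
        cases hgb : pvGrpAdj (y :: t) with
        | nil => exact absurd hgb (pvGrpAdj_cons_ne_nil y t)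
        | cons g gs => simp [hc]
      · intro k hk
        simp only [List.length_cons, List.length_nil] at hk
        have : k = 0 := by omega
        subst this; simp
      · refine Or.inr ?_
        simpa using hc

def pvEmit (ms : Int) (gs : List (List Int)) : List Int :=
  (gs.filter (fun g => decide (ms ≤ (g.length : Int)))).map (fun g => g.headD 0)

theorem pvEmit_cons (ms : Int) (g : List Int) (gs : List (List Int)) :
    pvEmit ms (g :: gs)
      = (if ms ≤ (g.length : Int) then [g.headD 0] else []) ++ pvEmit ms gs := by
  simp only [pvEmit, List.filter_cons]
  split <;> rename_i h
  · rw [if_pos (by simpa using h)]; rfl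
  · rw [if_neg (by simpa using h)]; rfl

-- ===== A-side: the stateful loop equals pvEmit ∘ pvGrpAdj =====

def pvStepA (ms : Int) (st : List Int × List Int × Option Int) (f : Int) :
    List Int × List Int × Option Int :=
  match st.2.2 with
  | none => (st.1, st.2.1 ++ [f], some f)
  | some p =>
    if f = p + 1 then (st.1, st.2.1 ++ [f], some f)
    else ((if ms ≤ (st.2.1.length : Int) then st.1 ++ [st.2.1.headD 0] else st.1), [f], some f)

def pvFlush (ms : Int) (s : List Int × List Int × Option Int) : List Int :=
  if ms ≤ (s.2.1.length : Int) then s.1 ++ [s.2.1.headD 0] else s.1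

theorem pvLoopA_eq (ms : Int) (l : List Int) : ∀ (x : Int) (stable run : List Int), run ≠ [] →
    pvFlush ms (l.foldl (pvStepA ms) (stable, run, some x))
      = (match pvGrpAdj (x :: l) with
         | [] => []
         | g :: gs =>
           (if ms ≤ (run.length : Int) + (g.length : Int) - 1 then stable ++ [run.headD 0] else stable)
             ++ pvEmit ms gs) := by
  induction l with
  | nil =>
    intro x stable run hrun
    simp only [List.foldl_nil, pvGrpAdj, pvFlush, pvEmit, List.filter_nil, List.map_nil,
      List.append_nil, List.length_cons, List.length_nil]
    have hiff : (ms ≤ (run.length : Int) + (((0 : Nat) + 1 : Nat) : Int) - 1) ↔ (ms ≤ (run.length : Int)) := by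
      push_cast; omega
    simp only [hiff]
  | cons f rest ih =>
    intro x stable run hrun
    rw [List.foldl_cons]
    by_cases hc : f = x + 1
    · have hstep : pvStepA ms (stable, run, some x) f = (stable, run ++ [f], some f) := by
        simp [pvStepA, hc]
      rw [hstep, ih f stable (run ++ [f]) (by simp)]
      cases hAD : pvGrpAdj (f :: rest) with
      | nil => exact absurd hAD (pvGrpAdj_cons_ne_nil f rest)
      | cons g gs =>
        unfold pvGrpAdj
        rw [hAD]
        simp only [if_pos hc]
        have hhd : (run ++ [f]).headD 0 = run.headD 0 := by
          cases run with | nil => exact absurd rfl hrun | cons a t => rfl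
        rw [hhd]
        have hiff : (ms ≤ ((run ++ [f]).length : Int) + (g.length : Int) - 1)
            ↔ (ms ≤ (run.length : Int) + (((x :: g).length : Nat) : Int) - 1) := by
          simp only [List.length_append, List.length_cons, List.length_nil]
          push_cast; omega
        simp only [hiff]
    · have hstep : pvStepA ms (stable, run, some x) f
          = ((if ms ≤ (run.length : Int) then stable ++ [run.headD 0] else stable), [f], some f) := by
        simp [pvStepA, hc]
      rw [hstep, ih f _ [f] (by simp)]
      obtain ⟨t, gs', hAD'⟩ := pvGrpAdj_head f rest
      rw [hAD']
      unfold pvGrpAdj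
      rw [hAD']
      simp only [if_neg hc]
      have h1 : (ms ≤ ((List.length [f] : Nat) : Int) + (((f :: t).length : Nat) : Int) - 1)
        ↔ (ms ≤ (((f :: t).length : Nat) : Int)) := by
        simp only [List.length_cons, List.length_nil]; push_cast; omega
      have h2 : (ms ≤ (run.length : Int) + ((List.length [x] : Nat) : Int) - 1)
        ↔ (ms ≤ (run.length : Int)) := by
        simp only [List.length_cons, List.length_nil]; push_cast; omega
      simp only [h1, h2]
      rw [pvEmit_cons]
      split <;> split <;> simp [List.append_assoc]

-- the two pipelines produce the same sorted filtered index list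
theorem pvIndices_eq (frame_rows : List (List (String × Int))) (mc : Int) :
    ((PySem.List.sorted frame_rows (fun row => pvFI row)).filter
        (fun row => decide (mc ≤ pvCC row))).map pvFI
      = PySem.List.sorted
          ((frame_rows.filter (fun row => decide (mc ≤ pvCC row))).map pvFI)
          (fun x => x) := by
  apply Eq.symm
  apply PySem.List.sorted_id_eq_of_perm_of_pairwise
  · exact List.Perm.map _ (List.Perm.filter _ (PySem.List.sorted_perm frame_rows _ false))
  · have hp : ((PySem.List.sorted frame_rows (fun row => pvFI row)).filter
        (fun row => decide (mc ≤ pvCC row))).Pairwise (fun a b => pvFI a ≤ pvFI b) :=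
      List.Pairwise.sublist List.filter_sublist (PySem.List.sorted_pairwise frame_rows _)
    exact (List.pairwise_map).mpr hp

-- ===== B-side: the positional filter equals pvEmit ∘ pvGrpAdj =====

theorem pvChainB_iff (ms : Int) (xs : List Int) (i : Nat) :
    pvChainB ms xs i = true ↔
      (ms ≤ 1 ∨ ((i : Int) + ms ≤ (xs.length : Int) ∧
        ∀ j : Int, 1 ≤ j → j < ms → xs.getD (i + j.toNat) 0 = xs.getD i 0 + j)) := by
  unfold pvChainB
  simp only [Bool.or_eq_true, Bool.and_eq_true, decide_eq_true_eq, List.all_eq_true,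
    beq_iff_eq]
  constructor
  · rintro (h | ⟨h1, h2⟩)
    · exact Or.inl h
    · refine Or.inr ⟨h1, fun j hj1 hj2 => h2 j ?_⟩
      rw [PySem.List.mem_pyRange_one]; exact ⟨hj1, hj2⟩
  · rintro (h | ⟨h1, h2⟩)
    · exact Or.inl h
    · refine Or.inr ⟨h1, fun j hj => ?_⟩
      rw [PySem.List.mem_pyRange_one] at hj
      exact h2 j hj.1 hj.2

theorem pvBcore_append (ms : Int) (g rest : List Int) (x : Int)
    (hne : g ≠ []) (hhead : g.getD 0 0 = x)
    (hcons : ∀ k, k < g.length → g.getD k 0 = x + k)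
    (hbrk : rest = [] ∨ rest.getD 0 0 ≠ x + g.length) :
    pvBcore ms (g ++ rest)
      = (if ms ≤ (g.length : Int) then [x] else []) ++ pvBcore ms rest := by
  have hG : 0 < g.length := List.length_pos_iff.mpr hne
  -- lookups in the two halves
  have hL : ∀ k, k < g.length → (g ++ rest).getD k 0 = g.getD k 0 := by
    intro k hk; rw [List.getD_append _ _ _ _ hk]
  have hR : ∀ k, (g ++ rest).getD (g.length + k) 0 = rest.getD k 0 := by
    intro k
    rw [List.getD_append_right _ _ _ _ (by omega)]
    congr 1
    omega
  have hval0 : (g ++ rest).getD 0 0 = x := by rw [hL 0 hG]; exact hhead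
  -- the anchored-chain test at position 0 decides exactly ms ≤ |g|
  have hchain0 : pvChainB ms (g ++ rest) 0 = decide (ms ≤ (g.length : Int)) := by
    rw [Bool.eq_iff_iff, pvChainB_iff, decide_eq_true_eq]
    constructor
    · rintro (h | ⟨h1, h2⟩)
      · omega
      · by_contra hlt
        push_neg at hlt
        have hRne : rest ≠ [] := by
          intro hnil
          subst hnil
          simp only [List.append_nil] at h1
          omega
        have hRlen : 0 < rest.length := List.length_pos_iff.mpr hRne
        have hj := h2 (g.length : Int) (by omega) (by omega)
        rw [Int.toNat_natCast] at hj
        have hidx := hR 0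
        rw [Nat.add_zero] at hidx
        rw [Nat.zero_add, hidx, hval0] at hj
        cases hbrk with
        | inl h => exact hRne h
        | inr h => exact h hj
    · intro h
      by_cases h1 : ms ≤ 1
      · exact Or.inl h1
      · refine Or.inr ⟨by simp only [List.length_append]; push_cast; omega, ?_⟩
        intro j hj1 hj2
        have hjG : j.toNat < g.length := by omega
        have hz : (0 : Nat) + j.toNat = j.toNat := by omega
        rw [hz, hL j.toNat hjG, hval0, hcons j.toNat hjG]
        omega
  -- positions 1..|g|-1 are never run starts
  have hstart : ∀ i, 0 < i → i < g.length → pvStartB (g ++ rest) i = false := by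
    intro i hi0 hiG
    unfold pvStartB
    rw [hL i hiG, hL (i - 1) (by omega), hcons i hiG, hcons (i - 1) (by omega)]
    have hcast : x + (i : Int) = x + ((i - 1 : Nat) : Int) + 1 := by omega
    rw [hcast]
    simp [Nat.pos_iff_ne_zero.mp hi0]
  -- shifted positions behave exactly like positions of rest
  have hstartShift : ∀ i, i < rest.length → pvStartB (g ++ rest) (g.length + i) = pvStartB rest i := by
    intro i hi
    unfold pvStartB
    cases i with
    | zero =>
      have hRne : rest ≠ [] := by intro h; rw [h] at hi; simp at hi
      have hbrk' : rest.getD 0 0 ≠ x + g.length := by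
        cases hbrk with
        | inl h => exact absurd h hRne
        | inr h => exact h
      have h1 : (g ++ rest).getD (g.length + 0) 0 = rest.getD 0 0 := hR 0
      have h2 : (g ++ rest).getD (g.length + 0 - 1) 0 = x + ((g.length - 1 : Nat) : Int) := by
        rw [Nat.add_zero, hL (g.length - 1) (by omega)]
        exact hcons (g.length - 1) (by omega)
      have hfin : (rest.getD 0 0 != x + ((g.length - 1 : Nat) : Int) + 1) = true := by
        rw [bne_iff_ne]
        intro h; apply hbrk'; omega
      rw [h1, h2, hfin]
      simp
    | succ i' =>
      have h1 : (g ++ rest).getD (g.length + (i' + 1)) 0 = rest.getD (i' + 1) 0 := hR (i' + 1)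
      have h2 : (g ++ rest).getD (g.length + (i' + 1) - 1) 0 = rest.getD i' 0 := by
        have : g.length + (i' + 1) - 1 = g.length + i' := by omega
        rw [this]; exact hR i'
      rw [h1, h2]
      simp
  have hchainShift : ∀ i, pvChainB ms (g ++ rest) (g.length + i) = pvChainB ms rest i := by
    intro i
    rw [Bool.eq_iff_iff, pvChainB_iff, pvChainB_iff]
    have hlen : ((g ++ rest).length : Int) = (g.length : Int) + (rest.length : Int) := by
      simp [List.length_append]
    have hlook : ∀ j : Int, 1 ≤ j →
        (g ++ rest).getD (g.length + i + j.toNat) 0 = rest.getD (i + j.toNat) 0 := by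
      intro j hj
      have : g.length + i + j.toNat = g.length + (i + j.toNat) := by omega
      rw [this]; exact hR (i + j.toNat)
    constructor
    · rintro (h | ⟨h1, h2⟩)
      · exact Or.inl h
      · refine Or.inr ⟨by rw [hlen] at h1; push_cast at h1 ⊢; omega, ?_⟩
        intro j hj1 hj2
        have := h2 j hj1 hj2
        rw [hlook j hj1, hR i] at this
        exact this
    · rintro (h | ⟨h1, h2⟩)
      · exact Or.inl h
      · refine Or.inr ⟨by rw [hlen]; push_cast at h1 ⊢; omega, ?_⟩
        intro j hj1 hj2
        rw [hlook j hj1, hR i]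
        exact h2 j hj1 hj2
  -- split the index range at |g|
  unfold pvBcore
  rw [List.length_append, List.range_add, List.filter_append, List.map_append]
  congr 1
  · -- the first |g| positions contribute [x] iff ms ≤ |g|
    obtain ⟨k, hk⟩ : ∃ k, g.length = k + 1 := ⟨g.length - 1, by omega⟩
    rw [hk, List.range_succ_eq_map, List.filter_cons]
    have htail : (((List.range k).map Nat.succ).filter
        (fun i => pvStartB (g ++ rest) i && pvChainB ms (g ++ rest) i)) = [] := by
      rw [List.filter_eq_nil_iff]
      intro a ha
      obtain ⟨i, hi, rfl⟩ := List.mem_map.mp ha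
      have hi' : i < k := List.mem_range.mp hi
      rw [hstart (Nat.succ i) (Nat.succ_pos i) (by omega)]
      simp
    have hs0 : pvStartB (g ++ rest) 0 = true := by simp [pvStartB]
    rw [hs0, hchain0, htail, hk] at *
    by_cases hms : ms ≤ ((k + 1 : Nat) : Int)
    · rw [if_pos hms]
      simp only [Bool.true_and, decide_eq_true hms, if_pos]
      simpa [List.getD] using hval0
    · rw [if_neg hms]
      simp only [Bool.true_and]
      rw [decide_eq_false hms]
      simp
  · -- the remaining positions reproduce pvBcore ms rest
    rw [List.filter_map, List.map_map]
    have hpt : (List.range rest.length).filter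
        ((fun i => pvStartB (g ++ rest) i && pvChainB ms (g ++ rest) i) ∘ fun i => g.length + i)
        = (List.range rest.length).filter (fun i => pvStartB rest i && pvChainB ms rest i) := by
      apply List.filter_congr
      intro i hi
      have hi' : i < rest.length := List.mem_range.mp hi
      simp only [Function.comp_apply]
      rw [hstartShift i hi', hchainShift i]
    rw [hpt]
    apply List.map_congr_left
    intro i _
    simp only [Function.comp_apply]
    exact hR i

theorem pvBcore_eq_emit_aux (ms : Int) : ∀ (n : Nat) (xs : List Int), xs.length ≤ n →
    pvBcore ms xs = pvEmit ms (pvGrpAdj xs) := by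
  intro n
  induction n with
  | zero =>
    intro xs hxs
    have : xs = [] := List.eq_nil_of_length_eq_zero (by omega)
    subst this
    simp [pvBcore, pvEmit, pvGrpAdj]
  | succ n ih =>
    intro xs hxs
    cases xs with
    | nil => simp [pvBcore, pvEmit, pvGrpAdj]
    | cons x l =>
      obtain ⟨g, rest, heq, hgrp, hne, hcons, hbrk⟩ := pvGrpAdj_decomp x l
      have hG : 0 < g.length := List.length_pos_iff.mpr hne
      have hhead : g.getD 0 0 = x := by
        have := hcons 0 hG
        simpa using this
      rw [heq, pvBcore_append ms g rest x hne hhead hcons hbrk, ← heq, hgrp, pvEmit_cons]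
      have hrlen : rest.length ≤ n := by
        have : (x :: l).length = g.length + rest.length := by rw [heq, List.length_append]
        simp only [List.length_cons] at hxs this
        omega
      rw [ih rest hrlen]
      congr 2
      rw [← hhead]
      cases g with
      | nil => exact absurd rfl hne
      | cons a t => rfl

theorem pvBcore_eq_emit (ms : Int) (xs : List Int) :
    pvBcore ms xs = pvEmit ms (pvGrpAdj xs) :=
  pvBcore_eq_emit_aux ms xs.length xs le_rfl

theorem pvAlt_eq_emit (frame_rows : List (List (String × Int))) (mc ms : Int) :
    stable_split_frames_py_alt frame_rows mc ms
      = pvEmit ms (pvGrpAdj (PySem.List.sorted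
          ((frame_rows.filter (fun row => decide (mc ≤ pvCC row))).map pvFI) (fun x => x))) := by
  unfold stable_split_frames_py_alt
  exact pvBcore_eq_emit ms _

-- ===== VERDICT (by name: the statement is the Claim_ definition above) =====
theorem stable_split_frames_py_spec : Claim_equal_stable_split_frames_py := by
  intro frame_rows mc ms _ _
  unfold Spec_stable_split_frames_py
  rw [pvAlt_eq_emit, ← pvIndices_eq]
  unfold stable_split_frames_py
  dsimp only
  set active := (PySem.List.sorted frame_rows (fun row => pvFI row)).filter
      (fun row => decide (mc ≤ pvCC row)) with hactive
  cases hA : active with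
  | nil => simp [pvEmit, pvGrpAdj]
  | cons r rs =>
    simp only [if_neg (by simp : ¬(r :: rs = []))]
    have hfold : (r :: rs).foldl (fun (st : List Int × List Int × Option Int) row =>
        let f := pvFI row
        match st.2.2 with
        | none => (st.1, st.2.1 ++ [f], some f)
        | some p =>
          if f = p + 1 then (st.1, st.2.1 ++ [f], some f)
          else ((if ms ≤ (st.2.1.length : Int) then st.1 ++ [st.2.1.headD 0] else st.1),
                [f], some f)) ([], [], none)
        = (rs.map pvFI).foldl (pvStepA ms) ([], [pvFI r], some (pvFI r)) := by
      rw [List.foldl_cons, List.foldl_map]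
      rfl
    show pvFlush ms _ = _
    rw [hfold, pvLoopA_eq ms (rs.map pvFI) (pvFI r) [] [pvFI r] (by simp)]
    simp only [List.map_cons]
    obtain ⟨t, gs, hAD⟩ := pvGrpAdj_head (pvFI r) (rs.map pvFI)
    rw [hAD]
    have hlen : (ms ≤ ((List.length [pvFI r] : Nat) : Int) + ((((pvFI r) :: t).length : Nat) : Int) - 1)
        ↔ (ms ≤ ((((pvFI r) :: t).length : Nat) : Int)) := by
      simp only [List.length_cons, List.length_nil]; push_cast; omega
    simp only [hlen]
    rw [pvEmit_cons]
    rfl
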